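-- pv_equiv track=rewrite | github.com/techdome-classroom/python-test-varun1653 | program2.py | decode_message
-- ===== SOURCE A (Python) =====
-- def decode_message(s: str, p: str) -> bool:
--     if len(s) != len(p):
--         return False
--
--     for m, k in zip(s, p):
--         if k == '*':
--             continue
--         elif k == '?':
--             continue
--         elif k != m:
--             return False
--
--     return True
-- ===== SOURCE B (Python) =====
-- import re
--
-- def decode_message(s: str, p: str) -> bool:
--     pattern = ''.join('.' if ch in '*?' else re.escape(ch) for ch in p)
--     return re.fullmatch(pattern, s, re.DOTALL) is not None
-- ===== Notes on version B (the rewrite author's own statement) =====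
-- stated objective: idiomatic
-- what changed: Instead of a length check plus an explicit per-position zip loop with early return, B compiles the pattern into a regular expression ('.' for each wildcard, re.escape for each literal character) and delegates the whole comparison, including the equal-length requirement, to re.fullmatch.
import Mathlib
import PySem

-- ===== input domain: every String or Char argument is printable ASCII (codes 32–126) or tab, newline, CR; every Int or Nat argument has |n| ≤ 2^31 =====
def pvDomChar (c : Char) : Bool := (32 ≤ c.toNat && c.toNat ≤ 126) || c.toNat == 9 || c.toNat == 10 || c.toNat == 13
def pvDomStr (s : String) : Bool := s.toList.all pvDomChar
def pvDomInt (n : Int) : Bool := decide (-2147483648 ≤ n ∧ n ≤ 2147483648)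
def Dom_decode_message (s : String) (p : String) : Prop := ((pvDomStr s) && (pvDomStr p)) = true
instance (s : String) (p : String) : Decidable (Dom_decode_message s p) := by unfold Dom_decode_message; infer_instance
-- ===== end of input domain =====

-- B replaces A's explicit per-position zip loop by compiling p into a regex and delegating the
-- whole comparison (including the equal-length requirement) to re.fullmatch — more idiomatic, not faster.
-- ===== PORT A =====
-- A: length check up front, then a left-to-right scan of zip(s, p) with early exit on mismatch.
def pvLoopA : List (Char × Char) → Bool
  | [] => true
  | (m, k) :: rest =>
    if k = '*' then pvLoopA rest
    else if k = '?' then pvLoopA rest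
    else if k ≠ m then false
    else pvLoopA rest

def decode_message (s : String) (p : String) : Bool :=
  if s.toList.length ≠ p.toList.length then false
  else pvLoopA (s.toList.zip p.toList)

-- ===== PORT B =====
-- B: builds a regex pattern ('.' per wildcard, re.escape(ch) per literal) and applies re.fullmatch.
-- Lean has no regex engine; the pattern is a list of single-character atoms, ported as tokens:
-- '.' (with re.DOTALL) matches exactly any one character, and re.escape(ch) matches exactly the
-- literal character ch, so fullmatch of this pattern is token-by-token matching — exact here.
inductive pvTok : Type
  | dot : pvTok
  | lit : Char → pvTok

-- pattern = ''.join('.' if ch in '*?' else re.escape(ch) for ch in p)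
def pvBuildPat (ps : List Char) : List pvTok :=
  ps.map (fun ch => if ch = '*' ∨ ch = '?' then pvTok.dot else pvTok.lit ch)

-- re.fullmatch(pattern, s, re.DOTALL) is not None, for a pattern of single-character atoms
def pvFullmatch : List pvTok → List Char → Bool
  | [], cs => cs.isEmpty
  | pvTok.dot :: ts, _ :: cs => pvFullmatch ts cs
  | pvTok.lit a :: ts, c :: cs => (a = c) && pvFullmatch ts cs
  | _ :: _, [] => false

def decode_message_alt (s : String) (p : String) : Bool :=
  pvFullmatch (pvBuildPat p.toList) s.toList

-- ===== PRECONDITION & SPEC =====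
def Spec_decode_message (s : String) (p : String) (out : Bool) : Prop := out = decode_message_alt s p
instance (s : String) (p : String) (out : Bool) : Decidable (Spec_decode_message s p out) := by unfold Spec_decode_message; infer_instance

-- ===== CLAIM (what is proved, stated in full; the proofs are below) =====
def Claim_equal_decode_message : Prop := ∀ (s : String) (p : String), Dom_decode_message s p → Spec_decode_message s p (decode_message s p)

-- ===== LEMMAS AND PROOFS =====
theorem pvLoop_eq_fullmatch (ps ms : List Char) :
    (if ms.length ≠ ps.length then false else pvLoopA (ms.zip ps)) =
      pvFullmatch (pvBuildPat ps) ms := by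
  induction ps generalizing ms with
  | nil => cases ms <;> simp [pvBuildPat, pvFullmatch, pvLoopA]
  | cons k ps ih =>
    cases ms with
    | nil => simp [pvBuildPat, pvFullmatch]
    | cons m ms =>
      have hih := ih ms
      simp only [pvBuildPat, List.map_cons] at *
      by_cases hlen : ms.length = ps.length
      · rw [if_neg (by omega)] at hih
        rw [if_neg (by simp; omega)]
        simp only [List.zip_cons_cons, pvLoopA]
        by_cases h1 : k = '*'
        · simp [h1, pvFullmatch, ← hih]
        · by_cases h2 : k = '?'
          · simp [h2, pvFullmatch, ← hih]
          · by_cases h3 : k = m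
            · subst h3; simp [h1, h2, pvFullmatch, ← hih]
            · simp [h1, h2, h3, pvFullmatch]
      · rw [if_pos (by omega)] at hih
        rw [if_pos (by simp; omega)]
        by_cases h1 : k = '*' <;> by_cases h2 : k = '?' <;>
          simp [h1, h2, pvFullmatch, ← hih]

-- ===== VERDICT (by name: the statement is the Claim_ definition above) =====
theorem decode_message_spec : Claim_equal_decode_message := by
  intro s p _
  unfold Spec_decode_message decode_message decode_message_alt
  exact pvLoop_eq_fullmatch p.toList s.toList
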